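-- pv_equiv track=rewrite | github.com/volodinvit-netizen/wave-coffee-bot | bot.py | get_status_by_receipts
-- ===== SOURCE A (Python) =====
-- STATUS_RULES = [
--     ("Explorer", 0),
--     ("Regular", 5),
--     ("Legend", 20),
--     ("Icon", 100),
-- ]
--
-- def get_status_by_receipts(count: int) -> tuple[str, int | None]:
--     current = STATUS_RULES[0][0]
--     next_threshold = None
--     for idx, (name, threshold) in enumerate(STATUS_RULES):
--         if count >= threshold:
--             current = name
--             if idx + 1 < len(STATUS_RULES):
--                 next_threshold = STATUS_RULES[idx + 1][1]
--         else:
--             next_threshold = threshold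
--             break
--     remaining = None if next_threshold is None else max(0, next_threshold - count)
--     return current, remaining
-- ===== SOURCE B (Python) =====
-- STATUS_RULES = [
--     ("Explorer", 0),
--     ("Regular", 5),
--     ("Legend", 20),
--     ("Icon", 100),
-- ]
--
-- def get_status_by_receipts(count: int) -> tuple[str, int | None]:
--     thresholds = [t for _, t in STATUS_RULES]
--     pos = sum(1 for t in thresholds if t <= count)
--     # below the first threshold you still hold the base status
--     current = STATUS_RULES[max(pos - 1, 0)][0]
--     remaining = thresholds[pos] - count if pos < len(thresholds) else 0
--     return current, remaining
-- ===== Notes on version B (the rewrite author's own statement) =====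
-- stated objective: idiomatic
-- what changed: Replaces A's indexed scan with early break and mutable current/next_threshold Option state by computing the rank (number of thresholds <= count) once and reading the status and the remaining amount directly from the table in closed form.
import Mathlib
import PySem

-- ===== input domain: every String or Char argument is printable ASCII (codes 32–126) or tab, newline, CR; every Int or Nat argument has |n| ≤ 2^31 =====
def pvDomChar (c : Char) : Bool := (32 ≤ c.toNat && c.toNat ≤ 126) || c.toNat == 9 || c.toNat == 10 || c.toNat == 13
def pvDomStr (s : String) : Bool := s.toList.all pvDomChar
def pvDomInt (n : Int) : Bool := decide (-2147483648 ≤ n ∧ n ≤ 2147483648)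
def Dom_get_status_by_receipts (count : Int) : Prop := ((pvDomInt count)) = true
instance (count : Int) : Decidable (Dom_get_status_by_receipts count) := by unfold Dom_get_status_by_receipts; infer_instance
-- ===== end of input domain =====

-- B replaces A's indexed scan with early break and mutable Option state by a rank count
-- (how many thresholds are ≤ count) plus direct closed-form reads; objective: idiomatic, same cost.

-- ===== PORT A =====
def STATUS_RULES : List (String × Int) :=
  [("Explorer", 0), ("Regular", 5), ("Legend", 20), ("Icon", 100)]

-- the for-loop of A: state (current, next_threshold); the 'else' branch breaks returning (current, some threshold)
def pvEnumerate (l : List (String × Int)) : List (Nat × (String × Int)) :=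
  (List.range l.length).zip l

def pvLoopA (count : Int) : List (Nat × (String × Int)) → String → Option Int → String × Option Int
  | [], cur, nt => (cur, nt)
  | (idx, name, thr) :: rest, cur, nt =>
    if count ≥ thr then
      pvLoopA count rest name
        (if idx + 1 < STATUS_RULES.length then some (STATUS_RULES.getD (idx + 1) ("", 0)).2 else nt)
    else (cur, some thr)

def get_status_by_receipts (count : Int) : String × Option Int :=
  let current0 := (STATUS_RULES.getD 0 ("", 0)).1
  let (current, nextThreshold) := pvLoopA count (pvEnumerate STATUS_RULES) current0 none
  (current, nextThreshold.map (fun t => max 0 (t - count)))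

-- ===== PORT B =====
def get_status_by_receipts_alt (count : Int) : String × Option Int :=
  let thresholds := STATUS_RULES.map Prod.snd
  let pos := (thresholds.filter (fun t => t ≤ count)).length
  -- Nat subtraction pos - 1 is Python's max(pos - 1, 0)
  let current := (STATUS_RULES.getD (pos - 1) ("", 0)).1
  let remaining := if pos < thresholds.length then thresholds.getD pos 0 - count else 0
  (current, some remaining)

-- ===== PRECONDITION & SPEC =====
def Spec_get_status_by_receipts (count : Int) (out : String × Option Int) : Prop := out = get_status_by_receipts_alt count
instance (count : Int) (out : String × Option Int) : Decidable (Spec_get_status_by_receipts count out) := by unfold Spec_get_status_by_receipts; infer_instance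

-- ===== CLAIM (what is proved, stated in full; the proofs are below) =====
def Claim_equal_get_status_by_receipts : Prop := ∀ (count : Int), Dom_get_status_by_receipts count → Spec_get_status_by_receipts count (get_status_by_receipts count)

-- ===== LEMMAS AND PROOFS =====

lemma pvEnum_rules : pvEnumerate [("Explorer", 0), ("Regular", 5), ("Legend", 20), ("Icon", 100)] =
    [(0, ("Explorer", 0)), (1, ("Regular", 5)), (2, ("Legend", 20)), (3, ("Icon", 100))] := by
  rfl

-- ===== VERDICT (by name: the statement is the Claim_ definition above) =====
theorem get_status_by_receipts_spec : Claim_equal_get_status_by_receipts := by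
  intro count _
  unfold Spec_get_status_by_receipts get_status_by_receipts get_status_by_receipts_alt
  rcases lt_or_ge count 0 with h0 | h0
  · simp [pvEnum_rules, pvLoopA, STATUS_RULES, List.filter,
      show ¬(0:Int) ≤ count by omega, show ¬(5:Int) ≤ count by omega,
      show ¬(20:Int) ≤ count by omega, show ¬(100:Int) ≤ count by omega]
    omega
  rcases lt_or_ge count 5 with h5 | h5
  · simp [pvEnum_rules, pvLoopA, STATUS_RULES, List.filter, h0,
      show ¬(5:Int) ≤ count by omega,
      show ¬(20:Int) ≤ count by omega, show ¬(100:Int) ≤ count by omega]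
    omega
  rcases lt_or_ge count 20 with h20 | h20
  · simp [pvEnum_rules, pvLoopA, STATUS_RULES, List.filter, h0, h5,
      show ¬(20:Int) ≤ count by omega, show ¬(100:Int) ≤ count by omega]
    omega
  rcases lt_or_ge count 100 with h100 | h100
  · simp [pvEnum_rules, pvLoopA, STATUS_RULES, List.filter, h0, h5, h20,
      show ¬(100:Int) ≤ count by omega]
    omega
  · simp [pvEnum_rules, pvLoopA, STATUS_RULES, List.filter, h0, h5, h20, h100]
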